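-- pv_equiv track=rewrite | github.com/pechenika7/dictionary_v3 | main.py | is_nickname
-- ===== SOURCE A (Python) =====
-- def is_nickname(word_):
--     nick_char = 'abcdefghijklmnopqrstuvwxyz_!?-.0123456789'
--     if word_[0].isdigit():
--         return False
--     for ch in word_.lower():
--         if ch not in nick_char:
--             return False
--     if (len(word_) >= 3) and (len(word_) <= 20):
--         return True
--     else:
--         return False
-- ===== SOURCE B (Python) =====
-- def is_nickname(word_):
--     if word_[0].isdigit():
--         return False
--     nick_char = 'abcdefghijklmnopqrstuvwxyz_!?-.0123456789'
--
--     def ok(i):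
--         # one fused recursive pass: validity and length decided together;
--         # any index past 20 means the word is too long, so stop immediately
--         if i > 20:
--             return False
--         if i == len(word_):
--             return 3 <= i
--         return word_[i].lower() in nick_char and ok(i + 1)
--
--     return ok(0)
-- ===== Notes on version B (the rewrite author's own statement) =====
-- stated objective: faster
-- what changed: Replaces A's staged passes (lowercase the whole string, loop over every character, then a separate length check) by one fused recursive index scan that carries the position as an accumulator, decides the length bound at the base case, and cuts off as soon as index 20 is passed, so it never examines more than 21 characters.
import Mathlib
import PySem

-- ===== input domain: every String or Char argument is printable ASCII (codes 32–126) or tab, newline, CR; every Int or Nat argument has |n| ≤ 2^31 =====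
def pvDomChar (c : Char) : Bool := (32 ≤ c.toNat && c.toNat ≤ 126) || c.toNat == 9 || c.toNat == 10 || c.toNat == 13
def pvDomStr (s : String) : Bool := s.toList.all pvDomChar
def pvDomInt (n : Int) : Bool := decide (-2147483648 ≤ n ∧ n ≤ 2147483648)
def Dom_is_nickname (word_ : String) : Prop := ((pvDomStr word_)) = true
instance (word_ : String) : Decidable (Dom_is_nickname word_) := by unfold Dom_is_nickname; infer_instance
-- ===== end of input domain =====

-- B fuses A's character loop and separate length check into one recursive index
-- scan with a cutoff past index 20; return value only.

-- ===== PORT A =====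
def pvNickChars : List Char := "abcdefghijklmnopqrstuvwxyz_!?-.0123456789".toList

-- the 'for ch in word_.lower(): if ch not in nick_char: return False' loop
def pvNickLoopA : List Char → Bool
  | [] => true
  | c :: rest => if PySem.Chars.isIn [c] pvNickChars = false then false else pvNickLoopA rest

def is_nickname (word_ : String) : Bool :=
  match PySem.Str.pyGet? word_ 0 with
  | none => false   -- word_[0] raises IndexError in Python; excluded by Pre_
  | some c0 =>
    if PySem.Chars.isdigit c0 then false
    else if pvNickLoopA (PySem.Str.lower word_).toList = false then false
    else if 3 ≤ PySem.Str.len word_ ∧ PySem.Str.len word_ ≤ 20 then true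
    else false

-- ===== PORT B =====
-- the recursive helper 'ok(i)' of Source B: i counts consumed characters
def pvOkB (w : List Char) (i : Nat) : Bool :=
  if 20 < i then false
  else if i = w.length then decide (3 ≤ i)
  else PySem.Chars.isIn (PySem.Chars.lower [PySem.List.pyGetD w (i : Int) ' ']) pvNickChars
        && pvOkB w (i + 1)
termination_by 21 - i
decreasing_by omega

def is_nickname_alt (word_ : String) : Bool :=
  match PySem.Str.pyGet? word_ 0 with
  | none => false   -- word_[0] raises IndexError in Python; excluded by Pre_
  | some c0 =>
    if PySem.Chars.isdigit c0 then false
    else pvOkB word_.toList 0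

-- ===== PRECONDITION & SPEC =====
-- Pre_ excludes only the empty string, on which A (and B) raise IndexError at word_[0].
def Pre_is_nickname (word_ : String) : Prop := word_ ≠ ""
instance (word_ : String) : Decidable (Pre_is_nickname word_) := by unfold Pre_is_nickname; infer_instance
def pvWitness_is_nickname : String := "abc"

def Spec_is_nickname (word_ : String) (out : Bool) : Prop := out = is_nickname_alt word_
instance (word_ : String) (out : Bool) : Decidable (Spec_is_nickname word_ out) := by unfold Spec_is_nickname; infer_instance

-- ===== CLAIM =====
def Claim_equal_is_nickname : Prop := ∀ (word_ : String), Dom_is_nickname word_ → Pre_is_nickname word_ → Spec_is_nickname word_ (is_nickname word_)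

-- ===== LEMMAS AND PROOFS =====
theorem pvIsIn_singleton (c : Char) (s : List Char) : PySem.Chars.isIn [c] s = s.contains c := by
  rw [Bool.eq_iff_iff]
  simp [PySem.Chars.isIn_iff_infix, List.singleton_infix_iff]

theorem pvLoopA_eq_all (l : List Char) :
    pvNickLoopA l = l.all (fun c => pvNickChars.contains c) := by
  induction l with
  | nil => rfl
  | cons c rest ih =>
    simp only [pvNickLoopA, List.all_cons, ih, pvIsIn_singleton]
    cases pvNickChars.contains c <;> simp

-- characterisation of B's recursive scan
theorem pvOkB_eq (w : List Char) : ∀ k i, w.length - i = k → i ≤ w.length →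
    pvOkB w i = ((w.drop i).all (fun c => pvNickChars.contains (PySem.Chars.lowerChar c))
                  && decide (3 ≤ w.length ∧ w.length ≤ 20)) := by
  intro k
  induction k with
  | zero =>
    intro i hk hle
    have hi : i = w.length := by omega
    rw [pvOkB]
    by_cases h20 : 20 < i
    · have : ¬ (3 ≤ w.length ∧ w.length ≤ 20) := by omega
      simp [h20, this]
    · rw [if_neg h20, if_pos hi]
      have h20' : w.length ≤ 20 := by omega
      simp [hi, h20']
  | succ k ih =>
    intro i hk hle
    have hlt : i < w.length := by omega
    rw [pvOkB]
    by_cases h20 : 20 < i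
    · have : ¬ (3 ≤ w.length ∧ w.length ≤ 20) := by omega
      simp [h20, this]
    · have hne : ¬ i = w.length := by omega
      have hget : PySem.List.pyGetD w (i : Int) ' ' = w[i] := by
        simp [PySem.List.pyGetD_natCast, List.getD_eq_getElem?_getD, hlt]
      rw [if_neg h20, if_neg hne, hget, ih (i + 1) (by omega) (by omega),
          List.drop_eq_getElem_cons hlt, List.all_cons]
      simp [PySem.Chars.lower, pvIsIn_singleton, Bool.and_assoc]

-- ===== VERDICT =====
theorem is_nickname_spec : Claim_equal_is_nickname := by
  intro word_ _ _
  unfold Spec_is_nickname is_nickname is_nickname_alt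
  cases h : PySem.Str.pyGet? word_ 0 with
  | none => rfl
  | some c0 =>
    cases hd : PySem.Chars.isdigit c0
    · simp only [hd, Bool.false_eq_true, if_false]
      rw [pvOkB_eq word_.toList word_.toList.length 0 (by omega) (by omega), List.drop_zero]
      have hA : pvNickLoopA (PySem.Str.lower word_).toList
          = word_.toList.all (fun c => pvNickChars.contains (PySem.Chars.lowerChar c)) := by
        rw [pvLoopA_eq_all]
        simp [PySem.Chars.lower, Function.comp_def]
      have hlen : PySem.Str.len word_ = (word_.toList.length : Int) := by simp
      have hiff : ((3:Int) ≤ (word_.toList.length:Int) ∧ (word_.toList.length:Int) ≤ 20)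
          ↔ (3 ≤ word_.toList.length ∧ word_.toList.length ≤ 20) := by
        constructor <;> intro hh <;> exact ⟨by exact_mod_cast hh.1, by exact_mod_cast hh.2⟩
      rw [hA, hlen]
      cases ha : word_.toList.all (fun c => pvNickChars.contains (PySem.Chars.lowerChar c))
      · simp
      · simp only [Bool.true_eq_false, if_false, Bool.true_and]
        rw [if_congr hiff rfl rfl]
        by_cases hl : 3 ≤ word_.toList.length ∧ word_.toList.length ≤ 20 <;> simp [hl]
    · simp [hd]
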